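-- pv_equiv track=rewrite | github.com/DariaMinieieva/Discrete_project | matrix_module.py | find_elements_amount
-- ===== SOURCE A (Python) =====
-- def find_elements_amount(all_elements: list, unique_elements: list) -> list:
--     """
--     Find the number of occurrences of each element in the matrix. Return a
--     list of tuples, where the first element is letter and the second one is
--     its number of occurences.
--     >>> find_elements_amount(['a', 'b', 'c', 'a', 'b', 'c', 'a', 'b', 'c'], ['a', 'b', 'c'])
--     [('a', 3), ('b', 3), ('c', 3)]
--     >>> find_elements_amount([], [])
--     []
--     >>> find_elements_amount(['a', 'c'], ['a', 'c'])
--     [('a', 1), ('c', 1)]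
--     """
--     tuples_list = []  # will be a list of all elements and their repetitions number
--     # add the element to the list of tuples if it repeats more than 1 time
--     for index1, elem1 in enumerate(all_elements):
--         for index2, elem2 in enumerate(all_elements):
--             if elem1 == elem2 and index1 != index2:
--                 if (index2 - index1) > 0:
--                     number = index2 - index1  # how much times element repeates
--                     tuples_list.append((elem1, number))
--                 break
--
--     repetitive_letters = [tuples_list[i][0]
--                           for i in range(len(tuples_list))]  # choose only letters
--     # add the element to the list of tuples if it repeats only 1 time
--     for letter in unique_elements:
--         if letter not in repetitive_letters:
--             tuples_list.append((letter, 1))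
--     return tuples_list
-- ===== SOURCE B (Python) =====
-- def find_elements_amount(all_elements: list, unique_elements: list) -> list:
--     # One pass: record the first two occurrence indices of each value, then
--     # emit (value, second - first) in first-occurrence order and (letter, 1)
--     # for letters that never got a second occurrence.
--     first = {}
--     second = {}
--     for i, e in enumerate(all_elements):
--         if e not in first:
--             first[e] = i
--         elif e not in second:
--             second[e] = i
--     res = [(e, second[e] - first[e]) for e in first if e in second]
--     res += [(letter, 1) for letter in unique_elements if letter not in second]
--     return res
-- ===== Notes on version B (the rewrite author's own statement) =====
-- stated objective: faster
-- what changed: Replaces the quadratic nested index scan with a single pass that records the first two occurrence indices of every value in two dicts, then emits (value, second-first) from the first dict and (letter, 1) for letters without a second occurrence.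
import Mathlib
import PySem

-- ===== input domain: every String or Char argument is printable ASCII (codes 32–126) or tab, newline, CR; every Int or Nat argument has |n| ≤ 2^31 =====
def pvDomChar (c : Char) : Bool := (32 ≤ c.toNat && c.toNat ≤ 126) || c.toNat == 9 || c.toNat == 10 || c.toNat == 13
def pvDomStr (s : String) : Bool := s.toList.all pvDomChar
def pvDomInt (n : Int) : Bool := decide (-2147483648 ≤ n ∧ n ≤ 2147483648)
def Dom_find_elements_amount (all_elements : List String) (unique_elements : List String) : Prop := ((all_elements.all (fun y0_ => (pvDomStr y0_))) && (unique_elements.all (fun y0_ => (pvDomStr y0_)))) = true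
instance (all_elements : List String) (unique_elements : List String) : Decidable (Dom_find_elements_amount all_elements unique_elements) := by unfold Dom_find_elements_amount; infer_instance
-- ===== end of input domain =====

-- B replaces A's quadratic nested index scan by a single pass recording the
-- first two occurrence indices of each value in two dicts (asymptotically faster).

-- ===== PORT A =====
-- inner `for index2, elem2 in enumerate(all_elements): … break` scan of A
def pvInnerA (i1 : Int) (e1 : String) : List (Int × String) → Option (String × Int)
  | [] => none
  | (i2, e2) :: rest =>
    if e1 = e2 ∧ i1 ≠ i2 then
      (if i2 - i1 > 0 then some (e1, i2 - i1) else none)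
    else pvInnerA i1 e1 rest

def find_elements_amount (all_elements : List String) (unique_elements : List String) : List (String × Int) :=
  let en := PySem.List.enumerate all_elements
  let tuples_list := en.foldl (fun acc p =>
      match pvInnerA p.1 p.2 en with
      | some t => acc ++ [t]
      | none => acc) []
  let repetitive_letters := tuples_list.map (fun t => t.1)
  unique_elements.foldl (fun acc letter =>
      if letter ∈ repetitive_letters then acc else acc ++ [(letter, 1)]) tuples_list

-- ===== PORT B =====
def find_elements_amount_alt (all_elements : List String) (unique_elements : List String) : List (String × Int) :=
  let fs := (PySem.List.enumerate all_elements).foldl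
    (fun (p : PySem.Dict String Int × PySem.Dict String Int) q =>
      if p.1.contains q.2 = false then (p.1.insert q.2 q.1, p.2)
      else if p.2.contains q.2 = false then (p.1, p.2.insert q.2 q.1)
      else p)
    (PySem.Dict.empty, PySem.Dict.empty)
  let res := fs.1.items.filterMap (fun kv => (fs.2.get? kv.1).map (fun j => (kv.1, j - kv.2)))
  res ++ unique_elements.filterMap (fun letter =>
      if fs.2.contains letter then none else some (letter, 1))

-- ===== PRECONDITION & SPEC =====
def Spec_find_elements_amount (all_elements : List String) (unique_elements : List String) (out : List (String × Int)) : Prop := out = find_elements_amount_alt all_elements unique_elements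
instance (all_elements : List String) (unique_elements : List String) (out : List (String × Int)) : Decidable (Spec_find_elements_amount all_elements unique_elements out) := by unfold Spec_find_elements_amount; infer_instance

-- ===== CLAIM (what is proved, stated in full; the proofs are below) =====
def Claim_equal_find_elements_amount : Prop := ∀ (all_elements : List String) (unique_elements : List String), Dom_find_elements_amount all_elements unique_elements → Spec_find_elements_amount all_elements unique_elements (find_elements_amount all_elements unique_elements)

-- ===== LEMMAS AND PROOFS =====

-- index of the first occurrence of e (none if absent)
def pvFIdx? (e : String) : List String → Option Nat
  | [] => none
  | x :: r => if x = e then some 0 else (pvFIdx? e r).map (· + 1)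

-- index of the second occurrence of e (none if e occurs at most once)
def pvSIdx? (e : String) : List String → Option Nat
  | [] => none
  | x :: r => if x = e then (pvFIdx? e r).map (· + 1) else (pvSIdx? e r).map (· + 1)

theorem pvFIdx?_isSome (e : String) (l : List String) : (pvFIdx? e l).isSome = true ↔ e ∈ l := by
  induction l with
  | nil => simp [pvFIdx?]
  | cons x r ih =>
    by_cases hx : x = e
    · simp [pvFIdx?, hx]
    · simp only [pvFIdx?, if_neg hx, Option.isSome_map, ih, List.mem_cons]
      exact ⟨Or.inr, fun h => h.elim (fun h' => absurd h'.symm hx) id⟩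

theorem pvFIdx?_lt (e : String) (l : List String) (i : Nat) (h : pvFIdx? e l = some i) :
    i < l.length := by
  induction l generalizing i with
  | nil => simp [pvFIdx?] at h
  | cons x r ih =>
    by_cases hx : x = e
    · simp only [pvFIdx?, if_pos hx, Option.some.injEq] at h
      simp only [List.length_cons]
      omega
    · simp only [pvFIdx?, if_neg hx] at h
      cases hf : pvFIdx? e r with
      | none => rw [hf] at h; simp at h
      | some j =>
        rw [hf] at h
        simp only [Option.map_some, Option.some.injEq] at h
        have := ih j hf
        simp only [List.length_cons]
        omega

theorem pvFIdx?_snoc (e x : String) (l : List String) :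
    pvFIdx? e (l ++ [x]) = (match pvFIdx? e l with
      | some i => some i
      | none => if x = e then some l.length else none) := by
  induction l with
  | nil => by_cases hx : x = e <;> simp [pvFIdx?, hx]
  | cons y r ih =>
    by_cases hy : y = e
    · simp [pvFIdx?, hy]
    · simp only [List.cons_append, pvFIdx?, if_neg hy, ih]
      cases hf : pvFIdx? e r with
      | some i => simp
      | none => by_cases hx : x = e <;> simp [hx, List.length_cons]

theorem pvSIdx?_snoc (e x : String) (l : List String) :
    pvSIdx? e (l ++ [x]) = (match pvSIdx? e l with
      | some j => some j
      | none => if x = e ∧ (pvFIdx? e l).isSome then some l.length else none) := by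
  induction l with
  | nil =>
    by_cases hx : x = e <;> simp [pvSIdx?, pvFIdx?, hx]
  | cons y r ih =>
    by_cases hy : y = e
    · simp only [List.cons_append, pvSIdx?, if_pos hy, pvFIdx?_snoc]
      cases hf : pvFIdx? e r with
      | some i => simp [pvFIdx?, hy]
      | none =>
        by_cases hx : x = e <;> simp [pvFIdx?, hy, hx, List.length_cons]
    · simp only [List.cons_append, pvSIdx?, if_neg hy, ih]
      cases hs : pvSIdx? e r with
      | some j => simp
      | none =>
        simp only [Option.map_none]
        by_cases hx : x = e
        · simp only [pvFIdx?, if_neg hy, Option.isSome_map, hx, true_and]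
          by_cases hf : (pvFIdx? e r).isSome <;> simp [hf, List.length_cons]
        · simp [hx]

theorem pvSIdx?_isSome_fidx (e : String) (l : List String) :
    (pvSIdx? e l).isSome = true → (pvFIdx? e l).isSome = true := by
  induction l with
  | nil => simp [pvSIdx?]
  | cons x r ih =>
    by_cases hx : x = e
    · simp [pvSIdx?, pvFIdx?, hx]
    · simp only [pvSIdx?, pvFIdx?, if_neg hx, Option.isSome_map]
      exact ih

theorem pvDedup_snoc (x : String) (l : List String) :
    PySem.List.dedup (l ++ [x]) =
      (if x ∈ l then PySem.List.dedup l else PySem.List.dedup l ++ [x]) := by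
  have h1 : PySem.List.dedup (l ++ [x]) = PySem.Set.add (PySem.List.dedup l) x := by
    rw [PySem.List.dedup_eq_ofList, PySem.List.dedup_eq_ofList,
        PySem.Set.ofList_eq_foldl, PySem.Set.ofList_eq_foldl, List.foldl_append]
    rfl
  rw [h1]
  have hmem : x ∈ PySem.List.dedup l ↔ x ∈ l := PySem.List.mem_dedup l x
  by_cases hx : x ∈ l
  · rw [if_pos hx]
    have hc : PySem.Set.contains (PySem.List.dedup l) x = true :=
      (PySem.Set.contains_iff _ _).mpr (hmem.mpr hx)
    simp [PySem.Set.add, hc, hx]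
  · rw [if_neg hx]
    have hc : PySem.Set.contains (PySem.List.dedup l) x = false := by
      rw [Bool.eq_false_iff]
      intro hcon
      exact hx (hmem.mp ((PySem.Set.contains_iff _ _).mp hcon))
    simp [PySem.Set.add, hc, hx]

-- A's append-or-skip fold is a filterMap
theorem pvFoldA (en scan : List (Int × String)) (acc : List (String × Int)) :
    scan.foldl (fun acc p => match pvInnerA p.1 p.2 en with | some t => acc ++ [t] | none => acc) acc
      = acc ++ scan.filterMap (fun p => pvInnerA p.1 p.2 en) := by
  induction scan generalizing acc with
  | nil => simp
  | cons x r ih =>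
    cases hg : pvInnerA x.1 x.2 en with
    | some t => simp [List.foldl_cons, hg, ih]
    | none => simp [List.foldl_cons, hg, ih]

-- A's conditional-append fold is a filterMap
theorem pvFoldTail (rep xs : List String) (acc : List (String × Int)) :
    xs.foldl (fun acc letter => if letter ∈ rep then acc else acc ++ [(letter, 1)]) acc
      = acc ++ xs.filterMap (fun letter => if letter ∈ rep then none else some (letter, (1 : Int))) := by
  induction xs generalizing acc with
  | nil => simp
  | cons x r ih =>
    by_cases hp : x ∈ rep <;> simp [List.foldl_cons, hp, ih]

-- the inner scan past the first occurrence finds the next occurrence of e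
theorem pvInnerA_tail (e : String) (r : List String) (i s : Int) (h : i < s) :
    pvInnerA i e (PySem.List.enumerate r s)
      = (pvFIdx? e r).map (fun (j : Nat) => (e, s + (j : Int) - i)) := by
  induction r generalizing s with
  | nil => simp [PySem.List.enumerate_nil, pvInnerA, pvFIdx?]
  | cons y r ih =>
    rw [PySem.List.enumerate_cons]
    by_cases hy : y = e
    · have hc : e = y ∧ i ≠ s := ⟨hy.symm, by omega⟩
      rw [pvInnerA, if_pos hc, if_pos (by omega : s - i > 0)]
      simp [pvFIdx?, hy]
    · have hc : ¬ (e = y ∧ i ≠ s) := by rintro ⟨he, -⟩; exact hy he.symm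
      rw [pvInnerA, if_neg hc, ih (s + 1) (by omega)]
      simp only [pvFIdx?, if_neg hy]
      cases hf : pvFIdx? e r with
      | none => simp
      | some j =>
        simp only [Option.map_some, Option.some.injEq, Prod.mk.injEq]
        exact ⟨by trivial, by push_cast; ring⟩

-- full characterisation of the inner scan at entry (s+k, l[k])
theorem pvInnerA_main (l : List String) (s : Int) (k : Nat) (e : String) (h : l[k]? = some e) :
    pvInnerA (s + k) e (PySem.List.enumerate l s)
      = (if pvFIdx? e l = some k
          then (pvSIdx? e l).map (fun (j : Nat) => (e, (j : Int) - (k : Int)))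
          else none) := by
  induction l generalizing s k with
  | nil => simp at h
  | cons x r ih =>
    rw [PySem.List.enumerate_cons]
    cases k with
    | zero =>
      have hx : x = e := by simpa using h
      subst hx
      have hself : ¬ (x = x ∧ s + ((0 : Nat) : Int) ≠ s) := by
        rintro ⟨-, hne⟩; apply hne; norm_num
      rw [pvInnerA, if_neg hself,
          pvInnerA_tail x r _ _ (by norm_num : s + ((0 : Nat) : Int) < s + 1)]
      have hf0 : pvFIdx? x (x :: r) = some 0 := by simp [pvFIdx?]
      have hs0 : pvSIdx? x (x :: r) = (pvFIdx? x r).map (· + 1) := by simp [pvSIdx?]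
      rw [hf0, hs0, if_pos rfl]
      cases hf : pvFIdx? x r with
      | none => simp
      | some j =>
        simp only [Option.map_some, Option.some.injEq, Prod.mk.injEq]
        exact ⟨by trivial, by push_cast; ring⟩
    | succ k' =>
      have hr : r[k']? = some e := by simpa using h
      by_cases hx : x = e
      · have hcond : e = x ∧ s + ((k' + 1 : Nat) : Int) ≠ s := by
          refine ⟨hx.symm, ?_⟩
          push_cast; omega
        rw [pvInnerA, if_pos hcond, if_neg (by push_cast; omega : ¬ (s - (s + ((k' + 1 : Nat) : Int)) > 0))]
        have h0 : pvFIdx? e (x :: r) = some 0 := by simp [pvFIdx?, hx]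
        rw [h0, if_neg (by simp)]
      · have hcond : ¬ (e = x ∧ s + ((k' + 1 : Nat) : Int) ≠ s) := by
          rintro ⟨he, -⟩; exact hx he.symm
        rw [pvInnerA, if_neg hcond]
        have harg : s + ((k' + 1 : Nat) : Int) = (s + 1) + (k' : Int) := by push_cast; ring
        rw [harg, ih (s + 1) k' hr]
        simp only [pvFIdx?, pvSIdx?, if_neg hx]
        cases hf : pvFIdx? e r with
        | none => simp
        | some i =>
          simp only [Option.map_some, Option.some.injEq]
          by_cases hik : i = k'
          · rw [if_pos hik, if_pos (by omega)]
            subst hik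
            cases hs' : pvSIdx? e r with
            | none => simp
            | some j =>
              simp only [Option.map_some, Option.some.injEq, Prod.mk.injEq]
              exact ⟨by trivial, by push_cast; ring⟩
          · rw [if_neg hik, if_neg (by omega)]

-- enumerate-filterMap keeping only first occurrences = filterMap over dedup
theorem pvDedupFilterMap (l : List String) (H : String → Option (String × Int)) :
    (PySem.List.enumerate l).filterMap
        (fun q => if (pvFIdx? q.2 l).map (fun (n : Nat) => (n : Int)) = some q.1 then H q.2 else none)
      = (PySem.List.dedup l).filterMap H := by
  induction l using List.reverseRecOn with
  | nil => simp [PySem.List.enumerate_nil]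
  | append_singleton l x ih =>
    have hen : PySem.List.enumerate (l ++ [x])
        = PySem.List.enumerate l ++ [(((0:Int) + l.length), x)] := by
      rw [PySem.List.enumerate_append, PySem.List.enumerate_cons, PySem.List.enumerate_nil]
    rw [hen, List.filterMap_append]
    have hpref : (PySem.List.enumerate l).filterMap
        (fun q => if (pvFIdx? q.2 (l ++ [x])).map (fun (n : Nat) => (n : Int)) = some q.1 then H q.2 else none)
        = (PySem.List.enumerate l).filterMap
        (fun q => if (pvFIdx? q.2 l).map (fun (n : Nat) => (n : Int)) = some q.1 then H q.2 else none) := by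
      apply List.filterMap_congr
      intro q hq
      rw [PySem.List.mem_enumerate_iff] at hq
      obtain ⟨k, hk, rfl⟩ := hq
      have hmem : l[k] ∈ l := List.getElem_mem hk
      obtain ⟨i, hi⟩ := Option.isSome_iff_exists.mp ((pvFIdx?_isSome _ _).mpr hmem)
      rw [pvFIdx?_snoc, hi]
    rw [hpref, ih, pvDedup_snoc]
    by_cases hx : x ∈ l
    · rw [if_pos hx]
      obtain ⟨i, hi⟩ := Option.isSome_iff_exists.mp ((pvFIdx?_isSome _ _).mpr hx)
      have hilt : i < l.length := pvFIdx?_lt x l i hi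
      have hff : pvFIdx? x (l ++ [x]) = some i := by rw [pvFIdx?_snoc, hi]
      simp [hff]
      exact fun h => absurd h (by omega)
    · rw [if_neg hx]
      have hfn : pvFIdx? x l = none := by
        cases hf : pvFIdx? x l with
        | none => rfl
        | some i => exact absurd ((pvFIdx?_isSome x l).mp (by simp [hf])) hx
      have heq : (pvFIdx? x (l ++ [x])).map (fun (n : Nat) => (n : Int)) = some ((0:Int) + l.length) := by
        rw [pvFIdx?_snoc, hfn]
        simp
      rw [List.filterMap_append]
      congr 1
      simp only [List.filterMap_cons, List.filterMap_nil, heq, if_pos rfl]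
      cases H x <;> simp

-- B's one-pass dict fold, named for the proofs
def pvBFold (l : List String) : PySem.Dict String Int × PySem.Dict String Int :=
  (PySem.List.enumerate l).foldl
    (fun (p : PySem.Dict String Int × PySem.Dict String Int) q =>
      if p.1.contains q.2 = false then (p.1.insert q.2 q.1, p.2)
      else if p.2.contains q.2 = false then (p.1, p.2.insert q.2 q.1)
      else p)
    (PySem.Dict.empty, PySem.Dict.empty)

theorem pvKeysDedup (l : List String) (d : List String) (hd : ∀ e ∈ d, e ∈ l) :
    (d.filterMap (fun e => (pvFIdx? e l).map (fun (i : Nat) => (e, (i : Int))))).map Prod.fst = d := by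
  induction d with
  | nil => simp
  | cons e r ih =>
    have he : e ∈ l := hd e List.mem_cons_self
    obtain ⟨i, hi⟩ := Option.isSome_iff_exists.mp ((pvFIdx?_isSome e l).mpr he)
    simp only [List.filterMap_cons, hi, Option.map_some, List.map_cons]
    rw [ih (fun a ha => hd a (List.mem_cons_of_mem _ ha))]

theorem pvBFold_char (l : List String) :
    (pvBFold l).1.items
        = (PySem.List.dedup l).filterMap (fun e => (pvFIdx? e l).map (fun (i : Nat) => (e, (i : Int))))
      ∧ ∀ e, (pvBFold l).2.get? e = (pvSIdx? e l).map (fun (j : Nat) => (j : Int)) := by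
  induction l using List.reverseRecOn with
  | nil =>
    constructor
    · simp only [pvBFold, PySem.List.enumerate_nil, List.foldl_nil]
      rfl
    · intro e
      simp [pvBFold, PySem.List.enumerate_nil, pvSIdx?, PySem.Dict.get?_empty]
  | append_singleton l x ih =>
    obtain ⟨ih1, ih2⟩ := ih
    have hstep : pvBFold (l ++ [x])
        = (fun (p : PySem.Dict String Int × PySem.Dict String Int) (q : Int × String) =>
            if p.1.contains q.2 = false then (p.1.insert q.2 q.1, p.2)
            else if p.2.contains q.2 = false then (p.1, p.2.insert q.2 q.1)
            else p) (pvBFold l) (((0:Int) + l.length), x) := by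
      rw [pvBFold, pvBFold, PySem.List.enumerate_append, PySem.List.enumerate_cons,
          PySem.List.enumerate_nil, List.foldl_append]
      rfl
    have hkeys : (pvBFold l).1.keys = PySem.List.dedup l := by
      show (pvBFold l).1.items.map (fun p => p.1) = PySem.List.dedup l
      rw [ih1]
      exact pvKeysDedup l _ (fun e he => (PySem.List.mem_dedup l e).mp he)
    have hc1 : (pvBFold l).1.contains x = decide (x ∈ l) := by
      rw [PySem.Dict.contains_eq_decide_mem_keys, hkeys]
      by_cases hx : x ∈ l <;> simp [hx, PySem.List.mem_dedup]
    have hc2 : (pvBFold l).2.contains x = (pvSIdx? x l).isSome := by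
      rw [PySem.Dict.contains_eq_isSome_get?, ih2 x]
      cases pvSIdx? x l <;> simp
    have hfprefix : ∀ e ∈ PySem.List.dedup l, pvFIdx? e (l ++ [x]) = pvFIdx? e l := by
      intro e he
      obtain ⟨i, hi⟩ := Option.isSome_iff_exists.mp
        ((pvFIdx?_isSome e l).mpr ((PySem.List.mem_dedup l e).mp he))
      rw [pvFIdx?_snoc, hi]
    by_cases hx : x ∈ l
    · have hc1' : (pvBFold l).1.contains x = true := by rw [hc1]; simp [hx]
      by_cases hs : (pvSIdx? x l).isSome = true
      · -- both dicts unchanged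
        have hc2' : (pvBFold l).2.contains x = true := by rw [hc2]; exact hs
        have hnew : pvBFold (l ++ [x]) = pvBFold l := by
          rw [hstep]; simp [hc1', hc2']
        obtain ⟨j, hj⟩ := Option.isSome_iff_exists.mp hs
        constructor
        · rw [hnew, ih1, pvDedup_snoc, if_pos hx]
          refine (List.filterMap_congr ?_).symm
          intro e he
          rw [hfprefix e he]
        · intro e
          rw [hnew, ih2 e, pvSIdx?_snoc]
          cases hse : pvSIdx? e l with
          | some j' => simp
          | none =>
            have hex : ¬ (x = e ∧ (pvFIdx? e l).isSome = true) := by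
              rintro ⟨rfl, -⟩
              rw [hse] at hj
              cases hj
            simp only [Option.map_none]
            rw [if_neg hex]
            simp
      · -- insert into second dict
        have hc2' : (pvBFold l).2.contains x = false := by
          rw [hc2]; simpa using hs
        have hnew : pvBFold (l ++ [x])
            = ((pvBFold l).1, (pvBFold l).2.insert x ((0:Int) + l.length)) := by
          rw [hstep]; simp [hc1', hc2']
        have hsn : pvSIdx? x l = none := by
          cases hse : pvSIdx? x l with
          | none => rfl
          | some j => rw [hse] at hs; simp at hs
        constructor
        · rw [hnew]
          dsimp only
          rw [ih1, pvDedup_snoc, if_pos hx]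
          refine (List.filterMap_congr ?_).symm
          intro e he
          rw [hfprefix e he]
        · intro e
          rw [hnew]
          dsimp only
          rw [PySem.Dict.get?_insert, pvSIdx?_snoc]
          by_cases hex : e = x
          · subst hex
            rw [if_pos rfl, hsn]
            have hfi : (pvFIdx? e l).isSome = true := (pvFIdx?_isSome e l).mpr hx
            simp [hfi]
          · rw [if_neg hex, ih2 e]
            cases hse : pvSIdx? e l with
            | some j' => simp
            | none =>
              have hcc : ¬ (x = e ∧ (pvFIdx? e l).isSome = true) := by
                rintro ⟨rfl, -⟩; exact hex rfl
              simp only [Option.map_none]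
              rw [if_neg hcc]
              simp
    · -- insert into first dict
      have hc1' : (pvBFold l).1.contains x = false := by rw [hc1]; simp [hx]
      have hnew : pvBFold (l ++ [x])
          = ((pvBFold l).1.insert x ((0:Int) + l.length), (pvBFold l).2) := by
        rw [hstep]; simp [hc1']
      have hfn : pvFIdx? x l = none := by
        cases hf : pvFIdx? x l with
        | none => rfl
        | some i => exact absurd ((pvFIdx?_isSome x l).mp (by simp [hf])) hx
      constructor
      · rw [hnew]
        dsimp only
        rw [PySem.Dict.items_insert_of_not_contains _ _ hc1', ih1,
            pvDedup_snoc, if_neg hx, List.filterMap_append]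
        congr 1
        · refine (List.filterMap_congr ?_).symm
          intro e he
          rw [hfprefix e he]
        · have hfx : pvFIdx? x (l ++ [x]) = some l.length := by
            rw [pvFIdx?_snoc, hfn]; simp
          simp [hfx]
      · intro e
        rw [hnew]
        dsimp only
        rw [ih2 e, pvSIdx?_snoc]
        cases hse : pvSIdx? e l with
        | some j' => simp
        | none =>
          have hcc : ¬ (x = e ∧ (pvFIdx? e l).isSome = true) := by
            rintro ⟨rfl, hfi⟩
            exact hx ((pvFIdx?_isSome x l).mp hfi)
          simp only [Option.map_none]
          rw [if_neg hcc]
          simp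

-- the common canonical value of both tuple lists
def pvH (l : List String) (e : String) : Option (String × Int) :=
  (pvFIdx? e l).bind (fun (i : Nat) => (pvSIdx? e l).map (fun (j : Nat) => (e, (j : Int) - (i : Int))))

theorem pvTuplesA (l : List String) :
    (PySem.List.enumerate l).filterMap (fun q => pvInnerA q.1 q.2 (PySem.List.enumerate l))
      = (PySem.List.dedup l).filterMap (pvH l) := by
  rw [← pvDedupFilterMap l (pvH l)]
  apply List.filterMap_congr
  intro q hq
  rw [PySem.List.mem_enumerate_iff] at hq
  obtain ⟨k, hk, rfl⟩ := hq
  have h : l[k]? = some l[k] := List.getElem?_eq_getElem hk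
  rw [pvInnerA_main l 0 k l[k] h]
  cases hf : pvFIdx? l[k] l with
  | none => simp [hf]
  | some i =>
    by_cases hik : i = k
    · subst hik
      rw [if_pos rfl, if_pos (by simp)]
      simp [pvH, hf]
    · rw [if_neg (by simp [hik]), if_neg (by simp; omega)]

theorem pvRepMem (l : List String) (letter : String) :
    letter ∈ ((PySem.List.dedup l).filterMap (pvH l)).map Prod.fst
      ↔ (pvSIdx? letter l).isSome = true := by
  constructor
  · intro hmem
    obtain ⟨p, hp, hfst⟩ := List.mem_map.mp hmem
    obtain ⟨e, hem, he⟩ := List.mem_filterMap.mp hp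
    have hpe : p.1 = e := by
      unfold pvH at he
      cases hf : pvFIdx? e l <;> rw [hf] at he
      · simp at he
      · cases hs : pvSIdx? e l <;> rw [hs] at he
        · simp at he
        · simp only [Option.bind_some, Option.map_some, Option.some.injEq] at he
          rw [← he]
    have hel : e = letter := by rw [← hpe, hfst]
    subst hel
    unfold pvH at he
    cases hs : pvSIdx? e l with
    | some j => simp
    | none =>
      rw [hs] at he
      cases pvFIdx? e l <;> simp at he
  · intro hs
    obtain ⟨j, hj⟩ := Option.isSome_iff_exists.mp hs
    have hfi : (pvFIdx? letter l).isSome = true := pvSIdx?_isSome_fidx letter l hs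
    obtain ⟨i, hi⟩ := Option.isSome_iff_exists.mp hfi
    have hmem : letter ∈ PySem.List.dedup l :=
      (PySem.List.mem_dedup l letter).mpr ((pvFIdx?_isSome letter l).mp hfi)
    apply List.mem_map.mpr
    refine ⟨(letter, (j : Int) - (i : Int)), ?_, rfl⟩
    apply List.mem_filterMap.mpr
    exact ⟨letter, hmem, by simp [pvH, hi, hj]⟩

-- ===== VERDICT (by name: the statement is the Claim_ definition above) =====
theorem find_elements_amount_spec : Claim_equal_find_elements_amount := by
  unfold Claim_equal_find_elements_amount
  intro al un _
  unfold Spec_find_elements_amount find_elements_amount find_elements_amount_alt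
  dsimp only
  obtain ⟨h1, h2⟩ := pvBFold_char al
  have hfold : (PySem.List.enumerate al).foldl
      (fun (p : PySem.Dict String Int × PySem.Dict String Int) q =>
        if p.1.contains q.2 = false then (p.1.insert q.2 q.1, p.2)
        else if p.2.contains q.2 = false then (p.1, p.2.insert q.2 q.1)
        else p)
      (PySem.Dict.empty, PySem.Dict.empty) = pvBFold al := rfl
  rw [hfold, pvFoldA (PySem.List.enumerate al), List.nil_append, pvTuplesA al, pvFoldTail]
  congr 1
  · rw [h1, List.filterMap_filterMap]
    apply List.filterMap_congr
    intro e _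
    cases hf : pvFIdx? e al with
    | none => simp [pvH, hf]
    | some i =>
      cases hs : pvSIdx? e al with
      | none => simp [pvH, hf, hs, h2]
      | some j => simp [pvH, hf, hs, h2]
  · apply List.filterMap_congr
    intro letter _
    have hrep : (letter ∈ ((PySem.List.dedup al).filterMap (pvH al)).map (fun t => t.1))
        ↔ (pvBFold al).2.contains letter = true := by
      rw [PySem.Dict.contains_eq_isSome_get?, h2 letter]
      have hiso : ((pvSIdx? letter al).map (fun (j : Nat) => (j : Int))).isSome
          = (pvSIdx? letter al).isSome := by
        cases pvSIdx? letter al <;> simp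
      rw [hiso]
      exact pvRepMem al letter
    by_cases hm : letter ∈ ((PySem.List.dedup al).filterMap (pvH al)).map (fun t => t.1)
    · rw [if_pos hm, if_pos (hrep.mp hm)]
    · rw [if_neg hm]
      have hcf : (pvBFold al).2.contains letter = false := by
        rw [Bool.eq_false_iff]
        intro hc
        exact hm (hrep.mpr hc)
      rw [hcf]
      simp
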